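-- pv_equiv track=rewrite | github.com/pypi-data/pypi-mirror-380 | packages/peek-core-search/peek-core-search-5.1.6.tar.gz/peek_core_search-5.1.6/peek_core_search/_private/worker/tasks/_CalcChunkKey.py | makeSearchIndexChunkKey
-- ===== SOURCE A (Python) =====
-- INDEX_BUCKET_COUNT = 8192
--
-- def makeSearchIndexChunkKey(key: str) -> str:
--     """Make Chunk Key
--
--     This is simple, and provides a reasonable distribution
--
--     :param key:
--
--     :return: chunkKey
--
--     """
--
--     if not key:
--         raise Exception("key is None or zero length")
--
--     bucket = 0
--     for char in key:
--         bucket = ((bucket << 5) - bucket) + ord(char)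
--         bucket = bucket | 0  # This is in the javascript code.
--
--     return str(bucket & (INDEX_BUCKET_COUNT - 1))
-- ===== SOURCE B (Python) =====
-- INDEX_BUCKET_COUNT = 8192
--
-- def makeSearchIndexChunkKey(key: str) -> str:
--     """Two staged passes with modular arithmetic: first build the positional
--     weights 31^i mod 8192, then sum ord(c)*weight over the reversed key and
--     reduce mod 8192 (equal to A's final & 8191 since the sum is nonnegative)."""
--     if not key:
--         raise Exception("key is None or zero length")
--     powers = []
--     p = 1
--     for _ in key:
--         powers.append(p)
--         p = p * 31 % INDEX_BUCKET_COUNT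
--     bucket = sum(ord(c) * w for c, w in zip(reversed(key), powers)) % INDEX_BUCKET_COUNT
--     return str(bucket)
-- ===== Notes on version B (the rewrite author's own statement) =====
-- stated objective: faster
-- what changed: Replaces A's Horner fold over an unbounded big integer by two staged passes: build the list of positional weights 31^i mod 8192, then sum ord(c)*weight over the reversed key and reduce mod 8192, so all intermediates stay below 8192.
import Mathlib
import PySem

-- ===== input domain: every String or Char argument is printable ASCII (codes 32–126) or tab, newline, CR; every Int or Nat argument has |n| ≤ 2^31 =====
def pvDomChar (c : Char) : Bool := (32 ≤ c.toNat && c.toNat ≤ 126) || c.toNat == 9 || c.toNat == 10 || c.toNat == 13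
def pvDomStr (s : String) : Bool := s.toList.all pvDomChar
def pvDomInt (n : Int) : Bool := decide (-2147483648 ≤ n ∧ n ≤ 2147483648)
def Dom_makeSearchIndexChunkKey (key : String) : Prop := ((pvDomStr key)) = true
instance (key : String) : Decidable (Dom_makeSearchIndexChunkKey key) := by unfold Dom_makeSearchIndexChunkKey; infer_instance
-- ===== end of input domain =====

-- B replaces A's Horner fold over an unbounded integer by two staged passes mod 8192
-- (build weights 31^i mod 8192, then a zip-sum over the reversed key); A raises on the
-- empty key (excluded by Pre_); return-value equivalence only.

-- ===== PORT A =====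
-- Horner loop: bucket = ((bucket << 5) - bucket) + ord(char); bucket = bucket | 0 (identity on Python ints)
def hornerLoop (l : List Char) (bucket : Int) : Int :=
  match l with
  | [] => bucket
  | c :: rest => hornerLoop rest (PySem.Int.bor (((bucket <<< (5:Nat)) - bucket) + (c.toNat : Int)) 0)

def makeSearchIndexChunkKey (key : String) : String :=
  PySem.Int.toStr (PySem.Int.band (hornerLoop key.toList 0) 8191)

-- ===== PORT B =====
-- pass 1: the list [1, 31, 31^2 mod 8192, ...], one entry per character
def buildPowers (n : Nat) (p : Int) : List Int :=
  match n with
  | 0 => []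
  | n + 1 => p :: buildPowers n (PySem.Int.mod (p * 31) 8192)

-- pass 2: sum of ord(c) * w over the zipped lists
def zipSum (cs : List Char) (ws : List Int) : Int :=
  match cs, ws with
  | c :: cs', w :: ws' => (c.toNat : Int) * w + zipSum cs' ws'
  | _, _ => 0

def makeSearchIndexChunkKey_alt (key : String) : String :=
  PySem.Int.toStr
    (PySem.Int.mod (zipSum key.toList.reverse (buildPowers key.toList.length 1)) 8192)

-- ===== PRECONDITION & SPEC =====
-- Pre_ excludes exactly the empty key, on which A raises Exception.
def Pre_makeSearchIndexChunkKey (key : String) : Prop := key ≠ ""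
instance (key : String) : Decidable (Pre_makeSearchIndexChunkKey key) := by unfold Pre_makeSearchIndexChunkKey; infer_instance
def pvWitness_makeSearchIndexChunkKey : String := "a"

def Spec_makeSearchIndexChunkKey (key : String) (out : String) : Prop := out = makeSearchIndexChunkKey_alt key
instance (key : String) (out : String) : Decidable (Spec_makeSearchIndexChunkKey key out) := by unfold Spec_makeSearchIndexChunkKey; infer_instance

-- ===== CLAIM =====
def Claim_equal_makeSearchIndexChunkKey : Prop := ∀ (key : String), Dom_makeSearchIndexChunkKey key → Pre_makeSearchIndexChunkKey key → Spec_makeSearchIndexChunkKey key (makeSearchIndexChunkKey key)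

-- ===== LEMMAS AND PROOFS =====

-- exact (unmodded) value of B's two passes: g cs p = Σ ord(cs[i]) * p * 31^i
def gsum (cs : List Char) (p : Int) : Int :=
  match cs with
  | [] => 0
  | c :: r => (c.toNat : Int) * p + gsum r (p * 31)

lemma gsum_append_singleton (l : List Char) (c : Char) (p : Int) :
    gsum (l ++ [c]) p = gsum l p + (c.toNat : Int) * (p * 31 ^ l.length) := by
  induction l generalizing p with
  | nil => simp [gsum]
  | cons d rest ih =>
      simp only [List.cons_append, gsum, ih, List.length_cons]
      ring

lemma horner_eq_gsum (l : List Char) (b : Int) :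
    hornerLoop l b = b * 31 ^ l.length + gsum l.reverse 1 := by
  induction l generalizing b with
  | nil => simp [hornerLoop, gsum]
  | cons c rest ih =>
      simp only [hornerLoop, List.reverse_cons, ih, gsum_append_singleton,
        List.length_cons, List.length_reverse, Int.shiftLeft_eq', PySem.Int.bor_zero]
      ring

lemma gsum_nonneg (cs : List Char) (p : Int) (hp : 0 ≤ p) : 0 ≤ gsum cs p := by
  induction cs generalizing p with
  | nil => simp [gsum]
  | cons c r ih =>
      have := ih (p * 31) (by positivity)
      have : 0 ≤ (c.toNat : Int) * p := by positivity
      simp only [gsum]; omega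

lemma zipSum_mod (cs : List Char) (p q : Int) (h : p % 8192 = q % 8192) :
    zipSum cs (buildPowers cs.length p) % 8192 = gsum cs q % 8192 := by
  induction cs generalizing p q with
  | nil => simp [zipSum, gsum]
  | cons c r ih =>
      have h31 : (p * 31) % 8192 % 8192 = (q * 31) % 8192 := by
        rw [Int.emod_emod_of_dvd _ (by norm_num)]
        exact (Int.ModEq.mul_right 31 h)
      have hrec := ih (PySem.Int.mod (p * 31) 8192) (q * 31)
        (by simpa [PySem.Int.mod_eq_emod_of_pos (show (0:Int) < 8192 by norm_num)] using h31)
      simp only [List.length_cons, buildPowers, zipSum, gsum]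
      calc ((c.toNat : Int) * p + zipSum r (buildPowers r.length (PySem.Int.mod (p * 31) 8192))) % 8192
          = ((c.toNat : Int) * q + gsum r (q * 31)) % 8192 := by
            exact Int.ModEq.add (Int.ModEq.mul_left _ h) hrec
        _ = _ := rfl

lemma band_8191_eq_mod (x : Int) (hx : 0 ≤ x) :
    PySem.Int.band x 8191 = PySem.Int.mod x 8192 := by
  rw [PySem.Int.band_of_nonneg hx (by norm_num),
    PySem.Int.mod_eq_emod_of_pos (show (0:Int) < 8192 by norm_num)]
  have hN : x.toNat &&& 8191 = x.toNat % 8192 := Nat.and_two_pow_sub_one_eq_mod x.toNat 13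
  rw [show Int.toNat 8191 = 8191 from rfl, hN]
  omega

-- ===== VERDICT =====
theorem makeSearchIndexChunkKey_spec : Claim_equal_makeSearchIndexChunkKey := by
  intro key _ _
  unfold Spec_makeSearchIndexChunkKey makeSearchIndexChunkKey makeSearchIndexChunkKey_alt
  have hH : hornerLoop key.toList 0 = gsum key.toList.reverse 1 := by
    simpa using horner_eq_gsum key.toList 0
  have hz : zipSum key.toList.reverse (buildPowers key.toList.length 1) % 8192
      = gsum key.toList.reverse 1 % 8192 := by
    have := zipSum_mod key.toList.reverse 1 1 rfl
    simpa [List.length_reverse] using this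
  rw [hH, band_8191_eq_mod _ (gsum_nonneg _ _ (by norm_num)),
    PySem.Int.mod_eq_emod_of_pos (show (0:Int) < 8192 by norm_num),
    PySem.Int.mod_eq_emod_of_pos (show (0:Int) < 8192 by norm_num), hz]
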